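-- pv_equiv track=rewrite | github.com/chickengak/coding-practice | essential-code-notes/A로 B 만들기.py | solution
-- ===== SOURCE A (Python) =====
-- def solution(before, after):
--     l = list(after)
--     for i in before:
--         try:
--             l.remove(i)
--         except:
--             return 0
--     return 1
-- ===== SOURCE B (Python) =====
-- def solution(before, after):
--     sa = sorted(before)
--     sb = sorted(after)
--     n = len(sb)
--     j = 0
--     for c in sa:
--         while j < n and sb[j] < c:
--             j += 1
--         if j == n or sb[j] != c:
--             return 0
--         j += 1
--     return 1
-- ===== Notes on version B (the rewrite author's own statement) =====
-- stated objective: faster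
-- what changed: Replaces the scan-and-remove loop (list.remove for each char of before, O(len(before)*len(after))) by sorting both strings once and matching sorted(before) against sorted(after) with a single two-pointer merge pass, O((m+n) log(m+n)).
import Mathlib
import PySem

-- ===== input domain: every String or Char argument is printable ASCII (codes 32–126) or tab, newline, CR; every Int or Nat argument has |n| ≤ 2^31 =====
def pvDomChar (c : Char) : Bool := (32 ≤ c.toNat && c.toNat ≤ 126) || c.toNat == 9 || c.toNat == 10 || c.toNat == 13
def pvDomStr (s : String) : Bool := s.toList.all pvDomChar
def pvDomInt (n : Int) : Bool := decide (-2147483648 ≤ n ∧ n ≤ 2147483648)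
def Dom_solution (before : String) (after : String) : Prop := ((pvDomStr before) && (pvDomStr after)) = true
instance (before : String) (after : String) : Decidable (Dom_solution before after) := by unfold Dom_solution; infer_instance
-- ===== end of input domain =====

-- B replaces A's per-character scan-and-remove by sorting both strings once and one two-pointer merge pass (faster; return value only, A never observably mutates its arguments).

-- ===== PORT A =====
-- 'for i in before: l.remove(i) / except: return 0' — remove first occurrence, bail out with 0 on ValueError
def solGoA : List Char → List Char → Int
  | [], _ => 1
  | i :: rest, l =>
    match PySem.List.remove? l i with
    | none => 0
    | some l' => solGoA rest l'

def solution (before : String) (after : String) : Int :=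
  solGoA before.toList after.toList

-- ===== PORT B =====
-- two-pointer walk over the two sorted lists: skip sb-elements below the current sa-head,
-- consume a match, fail as soon as the sa-head cannot occur any more
def solGoB : List Char → List Char → Int
  | [], _ => 1
  | _ :: _, [] => 0
  | c :: cs, b :: bs =>
    if b < c then solGoB (c :: cs) bs
    else if b = c then solGoB cs bs
    else 0
termination_by xs ys => xs.length + ys.length
decreasing_by all_goals (simp only [List.length_cons]; omega)

def solution_alt (before : String) (after : String) : Int :=
  solGoB (PySem.List.sorted before.toList (fun x => x) false)
         (PySem.List.sorted after.toList (fun x => x) false)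

-- ===== PRECONDITION & SPEC =====
def Spec_solution (before : String) (after : String) (out : Int) : Prop := out = solution_alt before after
instance (before : String) (after : String) (out : Int) : Decidable (Spec_solution before after out) := by unfold Spec_solution; infer_instance

-- ===== CLAIM (what is proved, stated in full; the proofs are below) =====
def Claim_equal_solution : Prop := ∀ (before : String) (after : String), Dom_solution before after → Spec_solution before after (solution before after)

-- ===== LEMMAS AND PROOFS =====

-- A returns 1 exactly when `bs` is a sub-multiset (subperm) of `l`
lemma solGoA_eq (bs : List Char) : ∀ l : List Char,
    solGoA bs l = if List.Subperm bs l then 1 else 0 := by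
  induction bs with
  | nil => intro l; simp [solGoA, List.nil_subperm]
  | cons i rest ih =>
    intro l
    by_cases hm : i ∈ l
    · have hiff : List.Subperm (i :: rest) l ↔ List.Subperm rest (l.erase i) := by
        rw [← Multiset.coe_le, ← Multiset.coe_le, ← Multiset.cons_coe, ← Multiset.coe_erase]
        conv_lhs => rw [← Multiset.cons_erase (show i ∈ (l : Multiset Char) from hm)]
        exact Multiset.cons_le_cons_iff i
      rw [solGoA, PySem.List.remove?_eq_some_erase l i hm]
      simp only [ih, hiff]
    · rw [solGoA, (PySem.List.remove?_eq_none_iff l i).2 hm]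
      have : ¬ List.Subperm (i :: rest) l := fun h => hm (h.subset (List.mem_cons_self))
      simp [this]

-- the merge pass decides the Sublist relation on a sorted second argument
lemma solGoB_eq : ∀ sa sb : List Char, sb.Pairwise (· ≤ ·) →
    solGoB sa sb = if List.Sublist sa sb then 1 else 0 := by
  intro sa sb
  fun_induction solGoB sa sb with
  | case1 l => simp
  | case2 c cs => simp
  | case3 c cs b bs hlt ih =>
    intro hp
    rw [ih hp.of_cons]
    have : List.Sublist (c :: cs) (b :: bs) ↔ List.Sublist (c :: cs) bs := by
      constructor
      · intro h
        cases h with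
        | cons _ h => exact h
        | cons₂ _ h => exact absurd rfl (ne_of_gt hlt)
      · exact fun h => h.cons b
    simp only [this]
  | case4 cs b bs hlt ih =>
    intro hp
    rw [ih hp.of_cons]; simp only [List.cons_sublist_cons]
  | case5 c cs b bs hlt hne =>
    intro hp
    have hcb : c < b := lt_of_le_of_ne (le_of_not_gt hlt) (Ne.symm hne)
    have : ¬ List.Sublist (c :: cs) (b :: bs) := by
      intro h
      have hc : c ∈ b :: bs := h.subset List.mem_cons_self
      rcases List.mem_cons.1 hc with rfl | hc
      · exact hne rfl
      · exact absurd (List.rel_of_pairwise_cons hp hc) (not_le.2 hcb)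
    simp [this]

-- sorted-sublist ↔ subperm of the originals
lemma sorted_sublist_iff (xs ys : List Char) :
    List.Sublist (PySem.List.sorted xs (fun x => x) false) (PySem.List.sorted ys (fun x => x) false)
      ↔ List.Subperm xs ys := by
  constructor
  · intro h
    exact ((PySem.List.sorted_perm xs (fun x => x) false).subperm_right.1
      ((PySem.List.sorted_perm ys (fun x => x) false).subperm_left.1 h.subperm))
  · intro h
    have hp : List.Subperm (PySem.List.sorted xs (fun x => x) false) (PySem.List.sorted ys (fun x => x) false) :=
      (PySem.List.sorted_perm xs (fun x => x) false).subperm_right.2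
        ((PySem.List.sorted_perm ys (fun x => x) false).subperm_left.2 h)
    exact List.sublist_of_subperm_of_pairwise hp
      (PySem.List.sorted_pairwise xs (fun x => x))
      (PySem.List.sorted_pairwise ys (fun x => x))

-- ===== VERDICT (by name: the statement is the Claim_ definition above) =====
theorem solution_spec : Claim_equal_solution := by
  intro before after _
  unfold Spec_solution solution solution_alt
  rw [solGoA_eq, solGoB_eq _ _ (PySem.List.sorted_pairwise after.toList (fun x => x))]
  simp only [sorted_sublist_iff]
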